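-- pv_equiv track=rewrite | github.com/romarioluiz/agendamento | romario/Ag_Producao/Ag_Producao/scheduling/algorithms/busca.py | custo
-- ===== SOURCE A (Python) =====
-- def custo(solucao):
--     tempo_atual = 0
--     penalidade = 0
--
--     for tarefa in solucao:
--         tempo_atual += tarefa["tempo"]
--
--         if tempo_atual > tarefa["deadline"]:
--             penalidade += tempo_atual - tarefa["deadline"]
--
--     return penalidade
-- ===== SOURCE B (Python) =====
-- def custo(solucao):
--     # Divide and conquer: penalty of a segment given the time already elapsed
--     # before it (offset). Split in half; the right half's offset is the
--     # offset plus the total processing time of the left half.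
--     def soma_tempos(xs):
--         return sum(t["tempo"] for t in xs)
--
--     def go(xs, offset):
--         if not xs:
--             return 0
--         if len(xs) == 1:
--             c = offset + xs[0]["tempo"]
--             return max(0, c - xs[0]["deadline"])
--         mid = len(xs) // 2
--         esq = xs[:mid]
--         return go(esq, offset) + go(xs[mid:], offset + soma_tempos(esq))
--
--     return go(solucao, 0)
-- ===== Notes on version B (the rewrite author's own statement) =====
-- stated objective: alternative
-- what changed: Replaces A's single fused left-to-right loop (running time + penalty accumulators) by a divide-and-conquer recursion: the penalty of a segment given an elapsed-time offset is the penalty of the left half plus the penalty of the right half at offset shifted by the left half's total processing time.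
import Mathlib
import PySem

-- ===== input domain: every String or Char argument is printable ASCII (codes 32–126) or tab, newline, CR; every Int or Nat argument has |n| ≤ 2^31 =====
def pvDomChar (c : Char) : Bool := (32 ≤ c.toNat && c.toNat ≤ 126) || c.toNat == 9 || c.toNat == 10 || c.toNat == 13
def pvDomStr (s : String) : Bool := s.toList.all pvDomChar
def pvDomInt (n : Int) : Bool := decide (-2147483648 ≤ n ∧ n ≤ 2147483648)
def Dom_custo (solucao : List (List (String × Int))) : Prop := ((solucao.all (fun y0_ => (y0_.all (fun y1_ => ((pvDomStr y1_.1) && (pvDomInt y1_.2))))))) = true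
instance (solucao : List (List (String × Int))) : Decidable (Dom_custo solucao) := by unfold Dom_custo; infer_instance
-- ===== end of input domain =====

-- B replaces A's fused left-to-right loop by a divide-and-conquer recursion on the
-- segment with an elapsed-time offset (return value only; neither mutates input).

-- dict lookup tarefa[k]: first match in the association list (the value under Pre_, where the key is present)
def dget (tarefa : List (String × Int)) (k : String) : Int :=
  (tarefa.lookup k).getD 0

-- ===== PORT A =====
def custoLoop (tempoAtual penalidade : Int) : List (List (String × Int)) → Int
  | [] => penalidade
  | tarefa :: rest =>
      let t' := tempoAtual + dget tarefa "tempo"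
      custoLoop t'
        (if t' > dget tarefa "deadline" then penalidade + (t' - dget tarefa "deadline") else penalidade)
        rest

def custo (solucao : List (List (String × Int))) : Int := custoLoop 0 0 solucao

-- ===== PORT B =====
-- sum(t["tempo"] for t in xs)
def somaTempos (xs : List (List (String × Int))) : Int :=
  (xs.map (fun t => dget t "tempo")).sum

-- go(xs, offset); xs[:mid] / xs[mid:] with 0 ≤ mid ≤ len xs are exactly take/drop
def goB : List (List (String × Int)) → Int → Int
  | [], _ => 0
  | [t], offset => max 0 (offset + dget t "tempo" - dget t "deadline")
  | a :: b :: rest, offset =>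
      let xs := a :: b :: rest
      let mid := xs.length / 2
      let esq := xs.take mid
      goB esq offset + goB (xs.drop mid) (offset + somaTempos esq)
termination_by xs _ => xs.length
decreasing_by
  · simp; omega
  · simp; omega

def custo_alt (solucao : List (List (String × Int))) : Int := goB solucao 0

-- ===== PRECONDITION & SPEC =====
-- Pre_ excludes tasks missing the "tempo" or "deadline" key, on which Python A raises KeyError.
def Pre_custo (solucao : List (List (String × Int))) : Prop :=
  (solucao.all (fun tarefa =>
    tarefa.any (fun kv => kv.1 == "tempo") && tarefa.any (fun kv => kv.1 == "deadline"))) = true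
instance (solucao : List (List (String × Int))) : Decidable (Pre_custo solucao) := by
  unfold Pre_custo; infer_instance

def pvWitness_custo : (List (List (String × Int))) :=
  [[("tempo", 3), ("deadline", 2)], [("tempo", 1), ("deadline", 10)]]

def Spec_custo (solucao : List (List (String × Int))) (out : Int) : Prop := out = custo_alt solucao
instance (solucao : List (List (String × Int))) (out : Int) : Decidable (Spec_custo solucao out) := by unfold Spec_custo; infer_instance

-- ===== CLAIM (what is proved, stated in full; the proofs are below) =====
def Claim_equal_custo : Prop := ∀ (solucao : List (List (String × Int))), Dom_custo solucao → Pre_custo solucao → Spec_custo solucao (custo solucao)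

-- ===== LEMMAS AND PROOFS =====
-- reference spec: penalty of a segment at elapsed-time offset
def penSum (offset : Int) : List (List (String × Int)) → Int
  | [] => 0
  | t :: r => max 0 (offset + dget t "tempo" - dget t "deadline") + penSum (offset + dget t "tempo") r

theorem penSum_append (l r : List (List (String × Int))) :
    ∀ offset, penSum offset (l ++ r) = penSum offset l + penSum (offset + somaTempos l) r := by
  induction l with
  | nil => intro o; simp [penSum, somaTempos]
  | cons x xs ih =>
      intro o
      simp only [List.cons_append, penSum, ih, somaTempos, List.map_cons, List.sum_cons]
      ring_nf

theorem goB_eq_penSum (xs : List (List (String × Int))) (offset : Int) :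
    goB xs offset = penSum offset xs := by
  induction xs, offset using goB.induct with
  | case1 o => simp [goB, penSum]
  | case2 t o => simp [goB, penSum]
  | case3 a b rest o xs mid esq ih1 ih2 =>
      rw [goB]
      show goB esq o + goB (List.drop mid xs) (o + somaTempos esq) = _
      rw [ih1, ih2, ← penSum_append, List.take_append_drop]

theorem custoLoop_eq_penSum (l : List (List (String × Int))) :
    ∀ (t p : Int), custoLoop t p l = p + penSum t l := by
  induction l with
  | nil => intro t p; simp [custoLoop, penSum]
  | cons x xs ih =>
      intro t p
      simp only [custoLoop, penSum]
      rw [ih]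
      split <;> omega

-- ===== VERDICT (by name: the statement is the Claim_ definition above) =====
theorem custo_spec : Claim_equal_custo := by
  intro solucao _ _
  unfold Spec_custo custo custo_alt
  rw [custoLoop_eq_penSum, goB_eq_penSum]
  omega
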